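-- pv_equiv track=rewrite | github.com/pranlawate/flowslice | src/flowslice/core/slicer.py | _filter_most_specific
-- ===== SOURCE A (Python) =====
-- def _filter_most_specific(names: set[str]) -> set[str]:
--     """Filter to keep only the most specific attribute paths.
--
--     If we have both "args" and "args.file", keep only "args.file".
--     If we have "obj.a" and "obj.b", keep both (different attributes).
--
--     Args:
--         names: Set of variable/attribute names
--
--     Returns:
--         Filtered set with only most specific paths
--     """
--     if not names:
--         return names
--
--     # Group by base name
--     result = set()
--     for name in names:
--         # Check if this name is a prefix of any other name
--         is_prefix = False
--         for other in names:
--             if other != name and other.startswith(name + "."):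
--                 # This name is a prefix of a more specific path
--                 is_prefix = True
--                 break
--         if not is_prefix:
--             result.add(name)
--
--     return result
-- ===== SOURCE B (Python) =====
-- def _filter_most_specific(names: set[str]) -> set[str]:
--     """Keep only names that are not a dotted prefix of another name.
--
--     One pass collects every proper dotted prefix of every name into a set;
--     a second pass keeps the names not in that set (O(total length) instead
--     of O(n^2 * L)).
--     """
--     if not names:
--         return names
--     prefixes = set()
--     for name in names:
--         for i, ch in enumerate(name):
--             if ch == ".":
--                 prefixes.add(name[:i])
--     return {n for n in names if n not in prefixes}
-- ===== Notes on version B (the rewrite author's own statement) =====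
-- stated objective: faster
-- what changed: Instead of testing every name against every other name with startswith (O(n^2*L)), B makes one pass collecting every proper dotted prefix of every name into a hash set and then keeps the names not in that set (O(total length)).
import Mathlib
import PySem

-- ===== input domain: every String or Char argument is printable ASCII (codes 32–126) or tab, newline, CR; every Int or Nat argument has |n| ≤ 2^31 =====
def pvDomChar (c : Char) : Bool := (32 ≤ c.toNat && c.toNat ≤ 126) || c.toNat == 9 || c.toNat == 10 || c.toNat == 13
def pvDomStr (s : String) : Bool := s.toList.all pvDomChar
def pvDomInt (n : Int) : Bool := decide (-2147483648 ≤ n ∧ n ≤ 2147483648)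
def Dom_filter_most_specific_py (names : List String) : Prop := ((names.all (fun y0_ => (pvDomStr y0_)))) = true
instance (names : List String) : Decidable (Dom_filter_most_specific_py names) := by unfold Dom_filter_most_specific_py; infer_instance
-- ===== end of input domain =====

-- B replaces A's all-pairs startswith scan (O(n^2·L)) by one pass that collects every
-- proper dotted prefix of every name into a set and keeps the names not in that set.


-- ===== PORT A =====
-- inner loop: 'for other in names: if other != name and other.startswith(name + "."): is_prefix = True; break'
def aIsPrefix (names : List String) (name : String) : Bool :=
  match names with
  | [] => false
  | other :: rest =>
    if other != name && PySem.Str.startswith other (name ++ ".") then true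
    else aIsPrefix rest name

def filter_most_specific_py (names : List String) : List String :=
  if names.isEmpty then names
  else
    names.foldl
      (fun result name =>
        if aIsPrefix names name then result else PySem.Set.add result name)
      PySem.Set.empty

-- ===== PORT B =====
-- inner loop: 'for i, ch in enumerate(name): if ch == ".": prefixes.add(name[:i])'
def bAddPrefixes (prefixes : PySem.Set String) (name : String) : PySem.Set String :=
  (PySem.List.enumerate name.toList).foldl
    (fun pfx p =>
      if p.2 == '.' then PySem.Set.add pfx (PySem.Str.slice name none (some p.1)) else pfx)
    prefixes

def filter_most_specific_py_alt (names : List String) : List String :=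
  if names.isEmpty then names
  else
    let prefixes := names.foldl bAddPrefixes PySem.Set.empty
    PySem.Set.ofList (names.filter (fun n => !(PySem.Set.contains prefixes n)))

-- ===== PRECONDITION & SPEC =====
def Spec_filter_most_specific_py (names : List String) (out : List String) : Prop := out = filter_most_specific_py_alt names
instance (names : List String) (out : List String) : Decidable (Spec_filter_most_specific_py names out) := by unfold Spec_filter_most_specific_py; infer_instance

-- ===== CLAIM (what is proved, stated in full; the proofs are below) =====
def Claim_equal_filter_most_specific_py : Prop := ∀ (names : List String), Dom_filter_most_specific_py names → Spec_filter_most_specific_py names (filter_most_specific_py names)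

-- ===== LEMMAS AND PROOFS =====

-- membership through a foldl whose step adds exactly the elements satisfying P
theorem mem_foldl_of_step {β : Type} (f : PySem.Set String → β → PySem.Set String)
    (P : β → String → Prop)
    (hf : ∀ s b x, x ∈ f s b ↔ x ∈ s ∨ P b x) :
    ∀ (l : List β) (s : PySem.Set String) (x : String),
      x ∈ l.foldl f s ↔ x ∈ s ∨ ∃ b ∈ l, P b x := by
  intro l
  induction l with
  | nil => simp
  | cons b l ih =>
    intro s x
    simp only [List.foldl_cons, ih, hf, List.mem_cons]
    constructor
    · rintro ((h | h) | ⟨c, hc, h⟩)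
      · exact Or.inl h
      · exact Or.inr ⟨b, Or.inl rfl, h⟩
      · exact Or.inr ⟨c, Or.inr hc, h⟩
    · rintro (h | ⟨c, (rfl | hc), h⟩)
      · exact Or.inl (Or.inl h)
      · exact Or.inl (Or.inr h)
      · exact Or.inr ⟨c, hc, h⟩

-- membership in B's inner per-name fold, with the enumerate counter generalized
theorem mem_bAddPrefixes_go (name : String) :
    ∀ (cs : List Char) (s : Nat) (acc : PySem.Set String) (x : String),
      x ∈ (PySem.List.enumerate cs (s : Int)).foldl
            (fun pfx p =>
              if p.2 == '.' then PySem.Set.add pfx (PySem.Str.slice name none (some p.1)) else pfx)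
            acc
        ↔ x ∈ acc ∨ ∃ k, k < cs.length ∧ cs[k]! = '.' ∧
            x = PySem.Str.slice name none (some ((s + k : Nat) : Int)) := by
  intro cs
  induction cs with
  | nil => simp [PySem.List.enumerate]
  | cons c cs ih =>
    intro s acc x
    simp only [PySem.List.enumerate_cons, List.foldl_cons]
    rw [show ((s : Int)) + 1 = ((s + 1 : Nat) : Int) by push_cast; ring]
    by_cases hc : c = '.'
    · simp only [hc, beq_self_eq_true, if_true, ih, PySem.Set.mem_add]
      constructor
      · rintro ((h | h) | ⟨k, hk, hdot, hx⟩)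
        · exact Or.inl h
        · exact Or.inr ⟨0, by simp, by simp, by simpa using h⟩
        · refine Or.inr ⟨k + 1, by simpa using hk, by simpa using hdot, ?_⟩
          rw [hx]; congr 2; omega
      · rintro (h | ⟨k, hk, hdot, hx⟩)
        · exact Or.inl (Or.inl h)
        · match k with
          | 0 => exact Or.inl (Or.inr (by rw [hx]; simp))
          | k + 1 =>
            refine Or.inr ⟨k, by simpa using hk, by simpa using hdot, ?_⟩
            rw [hx]; congr 2; omega
    · have hcb : (c == '.') = false := by simpa using hc
      simp only [hcb, ih]
      constructor
      · rintro (h | ⟨k, hk, hdot, hx⟩)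
        · exact Or.inl h
        · refine Or.inr ⟨k + 1, by simpa using hk, by simpa using hdot, ?_⟩
          rw [hx]; congr 2; omega
      · rintro (h | ⟨k, hk, hdot, hx⟩)
        · exact Or.inl h
        · match k with
          | 0 => exact absurd (by simpa using hdot) hc
          | k + 1 =>
            refine Or.inr ⟨k, by simpa using hk, by simpa using hdot, ?_⟩
            rw [hx]; congr 2; omega

-- membership in the full prefix set
theorem mem_prefixes (names : List String) (x : String) :
    x ∈ names.foldl bAddPrefixes PySem.Set.empty
      ↔ ∃ m ∈ names, ∃ k, k < m.toList.length ∧ m.toList[k]! = '.' ∧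
          x.toList = m.toList.take k := by
  have step : ∀ (s : PySem.Set String) (m : String) (x : String),
      x ∈ bAddPrefixes s m ↔ x ∈ s ∨ ∃ k, k < m.toList.length ∧ m.toList[k]! = '.' ∧
        x.toList = m.toList.take k := by
    intro s m x
    unfold bAddPrefixes
    rw [show (0 : Int) = ((0 : Nat) : Int) by rfl, mem_bAddPrefixes_go m m.toList 0 s x]
    constructor
    · rintro (h | ⟨k, hk, hdot, hx⟩)
      · exact Or.inl h
      · refine Or.inr ⟨k, hk, hdot, ?_⟩
        rw [hx]
        simp [PySem.Str.toList_slice, PySem.Chars.slice_eq_listSlice, PySem.List.slice_to_natCast]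
    · rintro (h | ⟨k, hk, hdot, hx⟩)
      · exact Or.inl h
      · refine Or.inr ⟨k, hk, hdot, ?_⟩
        apply String.toList_inj.mp
        rw [hx]
        simp [PySem.Str.toList_slice, PySem.Chars.slice_eq_listSlice, PySem.List.slice_to_natCast]
  rw [mem_foldl_of_step bAddPrefixes
    (fun m x => ∃ k, k < m.toList.length ∧ m.toList[k]! = '.' ∧ x.toList = m.toList.take k)
    step names PySem.Set.empty x]
  simp [PySem.Set.empty]

-- the char-level fact: "cs starts with name ++ '.'" ↔ "cs has a dot at k with take k = name"
theorem prefix_dot_iff (nameL cs : List Char) :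
    (nameL ++ ['.'] <+: cs) ↔ ∃ k, k < cs.length ∧ cs[k]! = '.' ∧ nameL = cs.take k := by
  constructor
  · rintro ⟨rest, hrest⟩
    refine ⟨nameL.length, ?_, ?_, ?_⟩
    · rw [← hrest]; simp
    · rw [← hrest]
      rw [getElem!_pos (nameL ++ ['.'] ++ rest) nameL.length (by simp)]
      simp
    · rw [← hrest]; simp
  · rintro ⟨k, hk, hdot, htake⟩
    refine ⟨cs.drop (k + 1), ?_⟩
    rw [htake]
    have : cs = cs.take k ++ cs[k] :: cs.drop (k + 1) := by
      conv_lhs => rw [← List.take_append_drop k cs]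
      congr 1
      exact List.drop_eq_getElem_cons hk
    rw [getElem!_pos cs k hk] at hdot
    rw [hdot] at this
    simpa using this.symm

-- A's inner loop is an existential over names
theorem aIsPrefix_iff (names : List String) (name : String) :
    aIsPrefix names name = true ↔ ∃ m ∈ names, name.toList ++ ['.'] <+: m.toList := by
  induction names with
  | nil => simp [aIsPrefix]
  | cons other rest ih =>
    unfold aIsPrefix
    rcases h : (other != name && PySem.Str.startswith other (name ++ ".")) with _ | _
    · simp only [Bool.false_eq_true, if_false, ih]
      constructor
      · rintro ⟨m, hm, hp⟩; exact ⟨m, List.mem_cons_of_mem _ hm, hp⟩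
      · rintro ⟨m, hm, hp⟩
        rcases List.mem_cons.mp hm with rfl | hm'
        · exfalso
          have hne : m ≠ name := by
            intro rfl'
            have := hp.length_le
            simp [rfl'] at this
          have : (m != name && PySem.Str.startswith m (name ++ ".")) = true := by
            refine (Bool.and_eq_true _ _).mpr ⟨by simpa using hne, ?_⟩
            simp only [PySem.Str.startswith_eq]
            exact (PySem.Chars.startswith_iff _ _).mpr (by simpa [String.toList_append] using hp)
          rw [h] at this
          exact Bool.false_ne_true this
        · exact ⟨m, hm', hp⟩
    · simp only [if_true, true_iff]
      have hsw := (Bool.and_eq_true _ _).mp h |>.2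
      refine ⟨other, List.mem_cons_self .., ?_⟩
      have := PySem.Chars.startswith_iff (other.toList) ((name ++ ".").toList) |>.mp (by simpa using hsw)
      simpa [String.toList_append] using this

-- the two per-name predicates agree
theorem pred_eq (names : List String) (name : String) :
    aIsPrefix names name = PySem.Set.contains (names.foldl bAddPrefixes PySem.Set.empty) name := by
  rcases h : PySem.Set.contains (names.foldl bAddPrefixes PySem.Set.empty) name with _ | _
  · rw [Bool.eq_false_iff]
    intro ha
    rcases (aIsPrefix_iff names name).mp ha with ⟨m, hm, hp⟩
    rcases (prefix_dot_iff name.toList m.toList).mp hp with ⟨k, hk, hdot, htake⟩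
    have : name ∈ names.foldl bAddPrefixes PySem.Set.empty :=
      (mem_prefixes names name).mpr ⟨m, hm, k, hk, hdot, htake⟩
    rw [PySem.Set.contains] at h
    simp only [List.contains_eq_mem, decide_eq_false_iff_not] at h
    exact h this
  · rw [PySem.Set.contains] at h
    simp only [List.contains_eq_mem, decide_eq_true_eq] at h
    rcases (mem_prefixes names name).mp h with ⟨m, hm, k, hk, hdot, htake⟩
    exact (aIsPrefix_iff names name).mpr
      ⟨m, hm, (prefix_dot_iff name.toList m.toList).mpr ⟨k, hk, hdot, htake⟩⟩

-- folding conditional adds equals ofList of the filtered list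
theorem foldl_if_add_eq (p : String → Bool) :
    ∀ (l : List String) (s : PySem.Set String),
      l.foldl (fun r x => if p x then r else PySem.Set.add r x) s
        = PySem.Set.update s (l.filter (fun x => !p x)) := by
  intro l
  induction l with
  | nil => intro s; simp [PySem.Set.update]
  | cons x l ih =>
    intro s
    rcases hx : p x with _ | _
    · simp only [List.foldl_cons, hx, Bool.false_eq_true, if_false, ih, List.filter_cons,
        Bool.not_false, if_pos]
      rw [PySem.Set.update_cons]
    · simp [hx, ih]

-- ===== VERDICT (by name: the statement is the Claim_ definition above) =====
theorem filter_most_specific_py_spec : Claim_equal_filter_most_specific_py := by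
  intro names _
  unfold Spec_filter_most_specific_py filter_most_specific_py filter_most_specific_py_alt
  rcases h : names.isEmpty with _ | _
  · simp only [Bool.false_eq_true, if_false]

    rw [foldl_if_add_eq (fun name => aIsPrefix names name) names PySem.Set.empty]
    simp only [PySem.Set.empty]
    rw [PySem.Set.update_nil_left]
    congr 1
    apply List.filter_congr
    intro x _
    rw [pred_eq names x]
    rfl
  · simp
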